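-- pv_equiv track=rewrite | github.com/MRstrongerCL/testcenter | TestCenter/LogicLib/PublicMethods.py | Remove_Str_From_List
-- ===== SOURCE A (Python) =====
-- def Remove_Str_From_List(l,rs,count=None):
--     if count==None:
--         c = l.count(rs)
--         for i in range(c):
--             l.remove(rs)
--     else:
--         c = int(count)
--         sc = l.count(rs)
--         if sc <= c:
--             tc = sc
--         else:
--             tc = c
--         for i in range(tc):
--             l.remove(rs)
--     return l
-- ===== SOURCE B (Python) =====
-- def Remove_Str_From_List(l, rs, count=None):
--     # Single forward pass with a removal budget instead of count() + repeated remove().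
--     removed = 0
--     kept = []
--     for x in l:
--         if x == rs and (count is None or removed < int(count)):
--             removed += 1
--         else:
--             kept.append(x)
--     l[:] = kept
--     return l
-- ===== Notes on version B (the rewrite author's own statement) =====
-- stated objective: alternative
-- what changed: Replaces count() followed by a loop of repeated l.remove(rs) scans with a single forward pass that keeps a removal budget and rewrites l[:] once.
import Mathlib
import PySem

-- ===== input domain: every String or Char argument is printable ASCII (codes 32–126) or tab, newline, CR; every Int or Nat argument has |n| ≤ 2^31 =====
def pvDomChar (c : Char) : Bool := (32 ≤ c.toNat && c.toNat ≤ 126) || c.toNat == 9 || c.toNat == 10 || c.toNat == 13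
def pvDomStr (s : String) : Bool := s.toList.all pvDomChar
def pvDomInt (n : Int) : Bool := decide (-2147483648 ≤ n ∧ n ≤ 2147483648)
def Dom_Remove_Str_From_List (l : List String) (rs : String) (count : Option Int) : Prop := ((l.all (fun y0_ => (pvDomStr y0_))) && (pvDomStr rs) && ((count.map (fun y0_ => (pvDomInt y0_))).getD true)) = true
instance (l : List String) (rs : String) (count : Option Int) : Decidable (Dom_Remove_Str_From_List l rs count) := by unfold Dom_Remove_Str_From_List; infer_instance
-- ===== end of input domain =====

-- ===== PORT A =====
-- B replaces A's count()+repeated-remove scans with one budgeted pass; both Pythons mutate l in place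
-- to the same final contents, and the equivalence proved here is about the returned list value.

-- 'for i in range(tc): l.remove(rs)' — remove the first occurrence tc times
def pvRemoveLoop (l : List String) (rs : String) : Nat → List String
  | 0 => l
  | n + 1 =>
    match PySem.List.remove? l rs with
    | some l' => pvRemoveLoop l' rs n
    | none => pvRemoveLoop l rs n   -- unreachable: tc never exceeds the number of occurrences

def Remove_Str_From_List (l : List String) (rs : String) (count : Option Int) : List String :=
  match count with
  | none => pvRemoveLoop l rs (PySem.List.count l rs)
  | some c =>
    let sc : Int := PySem.List.count l rs
    let tc : Int := if sc ≤ c then sc else c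
    pvRemoveLoop l rs tc.toNat   -- range(tc) is empty for tc ≤ 0

-- ===== PORT B =====
-- the for-loop of Source B: state = (removed, kept)
def pvAltGo (rs : String) (count : Option Int) : List String → Nat → List String → List String
  | [], _, kept => kept
  | x :: xs, removed, kept =>
    if x == rs && (match count with | none => true | some c => decide ((removed : Int) < c)) then
      pvAltGo rs count xs (removed + 1) kept
    else
      pvAltGo rs count xs removed (kept ++ [x])

def Remove_Str_From_List_alt (l : List String) (rs : String) (count : Option Int) : List String :=
  pvAltGo rs count l 0 []
-- ===== PRECONDITION & SPEC =====
def Spec_Remove_Str_From_List (l : List String) (rs : String) (count : Option Int) (out : List String) : Prop := out = Remove_Str_From_List_alt l rs count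
instance (l : List String) (rs : String) (count : Option Int) (out : List String) : Decidable (Spec_Remove_Str_From_List l rs count out) := by unfold Spec_Remove_Str_From_List; infer_instance

-- ===== CLAIM (what is proved, stated in full; the proofs are below) =====
def Claim_equal_Remove_Str_From_List : Prop := ∀ (l : List String) (rs : String) (count : Option Int), Dom_Remove_Str_From_List l rs count → Spec_Remove_Str_From_List l rs count (Remove_Str_From_List l rs count)

-- ===== LEMMAS AND PROOFS =====

-- specification form: remove the first n occurrences of rs
def rmN : List String → String → Nat → List String
  | [], _, _ => []
  | x :: xs, rs, n => if x = rs ∧ n ≠ 0 then rmN xs rs (n - 1) else x :: rmN xs rs n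

-- rm2: the same with an Int budget (negative = nothing to remove)
def rm2 : List String → String → Int → List String
  | [], _, _ => []
  | x :: xs, rs, b => if x = rs ∧ 0 < b then rm2 xs rs (b - 1) else x :: rm2 xs rs b

theorem rmN_zero (l : List String) (rs : String) : rmN l rs 0 = l := by
  induction l with
  | nil => rfl
  | cons x xs ih => simp [rmN, ih]

theorem rmN_not_mem (l : List String) (rs : String) (n : Nat) (h : rs ∉ l) :
    rmN l rs n = l := by
  induction l with
  | nil => rfl
  | cons x xs ih =>
    simp only [List.mem_cons, not_or] at h
    simp [rmN, Ne.symm h.1, ih h.2]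

theorem rmN_erase (l : List String) (rs : String) (n : Nat) (h : rs ∈ l) :
    rmN l rs (n + 1) = rmN (l.erase rs) rs n := by
  induction l with
  | nil => simp at h
  | cons x xs ih =>
    by_cases hx : x = rs
    · subst hx
      simp [rmN, List.erase_cons_head]
    · have hm : rs ∈ xs := by
        rcases List.mem_cons.mp h with h1 | h1
        · exact absurd h1.symm hx
        · exact h1
      rw [List.erase_cons_tail (by simp [hx])]
      simp [rmN, hx, ih hm]

theorem pvRemoveLoop_eq_rmN (n : Nat) (l : List String) (rs : String) :
    pvRemoveLoop l rs n = rmN l rs n := by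
  induction n generalizing l with
  | zero => simp [pvRemoveLoop, rmN_zero]
  | succ m ih =>
    rw [pvRemoveLoop]
    cases hr : PySem.List.remove? l rs with
    | none =>
      have hm : rs ∉ l := (PySem.List.remove?_eq_none_iff _ _).mp hr
      simp [ih, rmN_not_mem _ _ _ hm]
    | some l' =>
      have hm : rs ∈ l := by
        by_contra hc
        rw [(PySem.List.remove?_eq_none_iff _ _).mpr hc] at hr
        simp at hr
      have he : l' = l.erase rs := by
        have := PySem.List.remove?_eq_some_erase (xs := l) (v := rs) hm
        rw [hr] at this
        exact ((Option.some.injEq _ _).mp this.symm).symm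
      show pvRemoveLoop l' rs m = rmN l rs (m + 1)
      rw [ih, he, rmN_erase l rs m hm]

theorem rmN_of_count_le (l : List String) (rs : String) (n : Nat)
    (h : List.count rs l ≤ n) : rmN l rs n = l.filter (fun x => !(x == rs)) := by
  induction l generalizing n with
  | nil => rfl
  | cons x xs ih =>
    by_cases hx : x = rs
    · subst hx
      rw [List.count_cons_self] at h
      have hn : n ≠ 0 := by omega
      simp [rmN, hn, ih (n - 1) (by omega)]
    · have h' : List.count rs xs ≤ n := by simp [hx] at h; omega
      simp [rmN, hx, ih n h']

theorem rm2_eq_rmN (l : List String) (rs : String) (b : Int) :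
    rm2 l rs b = rmN l rs b.toNat := by
  induction l generalizing b with
  | nil => rfl
  | cons x xs ih =>
    by_cases hx : x = rs
    · subst hx
      by_cases hb : 0 < b
      · have h1 : b.toNat ≠ 0 := by omega
        have h2 : (b - 1).toNat = b.toNat - 1 := by omega
        simp [rm2, rmN, hb, h1, ih (b - 1), h2]
      · have h1 : b.toNat = 0 := by omega
        simp [rm2, rmN, hb, h1, ih b, rmN_zero]
    · simp [rm2, rmN, hx, ih b]

theorem altGo_none (l : List String) (rs : String) (removed : Nat) (kept : List String) :
    pvAltGo rs none l removed kept = kept ++ l.filter (fun x => !(x == rs)) := by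
  induction l generalizing removed kept with
  | nil => simp [pvAltGo]
  | cons x xs ih =>
    by_cases hx : x = rs
    · subst hx; simp [pvAltGo, ih]
    · simp [pvAltGo, hx, ih]

theorem altGo_some (l : List String) (rs : String) (c : Int) (removed : Nat)
    (kept : List String) :
    pvAltGo rs (some c) l removed kept = kept ++ rm2 l rs (c - removed) := by
  induction l generalizing removed kept with
  | nil => simp [pvAltGo, rm2]
  | cons x xs ih =>
    by_cases hx : x = rs
    · subst hx
      by_cases hb : (removed : Int) < c
      · have h2 : c - ((removed : Int) + 1) = (c - removed) - 1 := by ring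
        simp [pvAltGo, hb, rm2, ih, h2]
      · simp [pvAltGo, hb, rm2, ih]
    · simp [pvAltGo, hx, rm2, ih]

-- ===== VERDICT (by name: the statement is the Claim_ definition above) =====
theorem Remove_Str_From_List_spec : Claim_equal_Remove_Str_From_List := by
  intro l rs count _
  show Remove_Str_From_List l rs count = Remove_Str_From_List_alt l rs count
  cases count with
  | none =>
    simp only [Remove_Str_From_List, Remove_Str_From_List_alt, altGo_none,
      List.nil_append, pvRemoveLoop_eq_rmN]
    rw [PySem.List.count_eq, rmN_of_count_le _ _ _ (le_refl _)]
  | some c =>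
    simp only [Remove_Str_From_List, Remove_Str_From_List_alt, altGo_some,
      List.nil_append, pvRemoveLoop_eq_rmN, rm2_eq_rmN, PySem.List.count_eq,
      Nat.cast_zero, sub_zero]
    by_cases h : (List.count rs l : Int) ≤ c
    · rw [if_pos h]
      have h1 : List.count rs l ≤ ((List.count rs l : Int)).toNat := by omega
      have h2 : List.count rs l ≤ c.toNat := by omega
      rw [rmN_of_count_le _ _ _ h1, rmN_of_count_le _ _ _ h2]
    · rw [if_neg h]
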